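-- pv_equiv track=rewrite | github.com/halogen28372/Tokenizer_Focus | arc_lago_tokenizer.py | detect_repeating_tiles
-- ===== SOURCE A (Python) =====
-- from typing import List, Tuple, Dict, Optional, Set
--
-- Grid  = List[List[int]]  # integer colors, 0..K-1 (or -1 for blank background)
--
-- def detect_repeating_tiles(grid: Grid) -> Optional[Dict]:
--     H,W = len(grid), len(grid[0])
--     # brute-force small periods up to min(8, W//2, H//2)
--     maxP = max(2, min(8, H//2, W//2))
--     best = None
--     for ph in range(1, maxP+1):
--         for pw in range(1, maxP+1):
--             ok = True
--             for r in range(H):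
--                 for c in range(W):
--                     if grid[r][c] != grid[r % ph][c % pw]:
--                         ok = False; break
--                 if not ok: break
--             if ok:
--                 best = {"tile_h": ph, "tile_w": pw}
--                 break
--         if best: break
--     return best
-- ===== SOURCE B (Python) =====
-- def detect_repeating_tiles(grid):
--     H, W = len(grid), len(grid[0])
--     maxP = max(2, min(8, H // 2, W // 2))
--     periods = range(1, maxP + 1)
--     # the pair condition factorizes: check each axis independently
--     ph = next((p for p in periods
--                if all(grid[r][:W] == grid[r % p][:W] for r in range(H))), None)
--     pw = next((p for p in periods
--                if all(row[c] == row[c % p] for row in grid for c in range(W))), None)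
--     if ph is None or pw is None:
--         return None
--     return {"tile_h": ph, "tile_w": pw}
-- ===== Notes on version B (the rewrite author's own statement) =====
-- stated objective: alternative
-- what changed: The nested ph-by-pw pair search over the full grid is replaced by two independent axis scans (smallest vertical period via row W-prefix equality, smallest horizontal period via a per-row column scan), exploiting that the tiling condition factorizes.
-- outside the precondition, e.g. on detect_repeating_tiles([[1, 2], [3, 4], [5]]): A returns None, B raises IndexError
import Mathlib
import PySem

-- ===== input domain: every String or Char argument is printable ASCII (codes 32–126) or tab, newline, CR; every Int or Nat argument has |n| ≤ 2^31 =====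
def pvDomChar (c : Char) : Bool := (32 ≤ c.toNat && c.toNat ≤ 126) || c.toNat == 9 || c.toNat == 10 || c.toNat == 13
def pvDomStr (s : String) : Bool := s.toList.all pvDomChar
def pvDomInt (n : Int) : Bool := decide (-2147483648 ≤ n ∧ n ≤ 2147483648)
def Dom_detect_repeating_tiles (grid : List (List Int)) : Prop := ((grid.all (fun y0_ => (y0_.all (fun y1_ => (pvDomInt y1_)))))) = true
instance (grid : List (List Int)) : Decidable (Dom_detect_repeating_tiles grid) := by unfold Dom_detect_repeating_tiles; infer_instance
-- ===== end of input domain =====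

-- ===== PORT A =====
-- B replaces A's nested period-pair search with two independent axis scans (same result; see Pre_ for the excluded ragged grids).
-- cell access grid[r][c]; inside Pre_ (rectangular, r < H, c < W) all indices are in range, so getD is exact
def pvGet (grid : List (List Int)) (r c : Nat) : Int := (grid.getD r []).getD c 0

-- the two inner loops over r, c with `ok = False; break`: short-circuiting `all` over the same ranges
def aOk (grid : List (List Int)) (H W ph pw : Nat) : Bool :=
  (List.range H).all fun r => (List.range W).all fun c =>
    pvGet grid r c == pvGet grid (r % ph) (c % pw)

-- the two outer loops over ph, pw with `best = ...; break`: first ph (inner: first pw) that succeeds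
def aSearch (grid : List (List Int)) (H W : Nat) (pws : List Nat) : List Nat → Option (Nat × Nat)
  | [] => none
  | ph :: rest =>
    match pws.find? (fun pw => aOk grid H W ph pw) with
    | some pw => some (ph, pw)
    | none => aSearch grid H W pws rest

def detect_repeating_tiles (grid : List (List Int)) : Option (List (String × Int)) :=
  let H := grid.length
  let W := (grid.headD []).length
  let maxP := max 2 (min 8 (min (H / 2) (W / 2)))
  let ps := (List.range maxP).map (· + 1)   -- range(1, maxP+1)
  match aSearch grid H W ps ps with
  | some (ph, pw) => some [("tile_h", (ph : Int)), ("tile_w", (pw : Int))]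
  | none => none

-- ===== PORT B =====
-- all(grid[r][:W] == grid[r % p][:W] for r in range(H)); inside Pre_ rows have length ≥ W,
-- so grid[r][:W] is exactly List.take W
def altV (grid : List (List Int)) (H W ph : Nat) : Bool :=
  (List.range H).all fun r => (grid.getD r []).take W == ((grid.getD (r % ph) []).take W)

-- all(row[c] == row[c % p] for row in grid for c in range(W))
def altHz (grid : List (List Int)) (W pw : Nat) : Bool :=
  grid.all fun row => (List.range W).all fun c => row.getD c 0 == row.getD (c % pw) 0

def detect_repeating_tiles_alt (grid : List (List Int)) : Option (List (String × Int)) :=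
  let H := grid.length
  let W := (grid.headD []).length
  let maxP := max 2 (min 8 (min (H / 2) (W / 2)))
  let ps := (List.range maxP).map (· + 1)   -- range(1, maxP+1)
  match ps.find? (altV grid H W), ps.find? (altHz grid W) with
  | some ph, some pw => some [("tile_h", (ph : Int)), ("tile_w", (pw : Int))]
  | _, _ => none

-- ===== PRECONDITION & SPEC =====
-- Pre_ excludes the empty grid (A raises IndexError on grid[0]) and grids with a row shorter than
-- row 0: there A raises IndexError unless an earlier mismatch happens to break out of the scan
-- first, so whether A returns at all is a scan-order accident (and B raises on all such grids).
def Pre_detect_repeating_tiles (grid : List (List Int)) : Prop :=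
  grid ≠ [] ∧ ∀ row ∈ grid, (grid.headD []).length ≤ row.length
instance (grid : List (List Int)) : Decidable (Pre_detect_repeating_tiles grid) := by
  unfold Pre_detect_repeating_tiles; infer_instance

def pvWitness_detect_repeating_tiles : List (List Int) := [[1, 0], [0, 1]]

def Spec_detect_repeating_tiles (grid : List (List Int)) (out : Option (List (String × Int))) : Prop := out = detect_repeating_tiles_alt grid
instance (grid : List (List Int)) (out : Option (List (String × Int))) : Decidable (Spec_detect_repeating_tiles grid out) := by unfold Spec_detect_repeating_tiles; infer_instance

-- ===== CLAIM (what is proved, stated in full; the proofs are below) =====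
def Claim_equal_detect_repeating_tiles : Prop := ∀ (grid : List (List Int)), Dom_detect_repeating_tiles grid → Pre_detect_repeating_tiles grid → Spec_detect_repeating_tiles grid (detect_repeating_tiles grid)

-- ===== LEMMAS AND PROOFS =====

theorem pv_find?_congr {α : Type} {p q : α → Bool} : ∀ {l : List α},
    (∀ a ∈ l, p a = q a) → l.find? p = l.find? q := by
  intro l
  induction l with
  | nil => intro _; rfl
  | cons a t ih =>
    intro h
    simp only [List.find?]
    rw [h a (List.mem_cons_self)]
    cases q a with
    | true => rfl
    | false => exact ih (fun b hb => h b (List.mem_cons_of_mem _ hb))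

-- characterisation of aOk as the pointwise condition
theorem aOk_iff (grid : List (List Int)) (H W ph pw : Nat) :
    aOk grid H W ph pw = true ↔
      ∀ r < H, ∀ c < W, pvGet grid r c = pvGet grid (r % ph) (c % pw) := by
  simp [aOk, List.all_eq_true, List.mem_range]

theorem altV_iff (grid : List (List Int)) (H W ph : Nat) :
    altV grid H W ph = true ↔
      ∀ r < H, (grid.getD r []).take W = (grid.getD (r % ph) []).take W := by
  simp [altV, List.all_eq_true, List.mem_range]

theorem altHz_iff (grid : List (List Int)) (W pw : Nat) :
    altHz grid W pw = true ↔
      ∀ row ∈ grid, ∀ c < W, row.getD c 0 = row.getD (c % pw) 0 := by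
  simp [altHz, List.all_eq_true, List.mem_range]

theorem getD_mem {grid : List (List Int)} {r : Nat} (h : r < grid.length) :
    grid.getD r [] ∈ grid := by
  rw [List.getD_eq_getElem grid [] h]
  exact List.getElem_mem h

-- the factorization: A's pair condition holds iff both axis conditions hold (on rectangular grids)
theorem getD_take_eq (a : List Int) (W c : Nat) (hc : c < W) (hl : c < a.length) :
    (a.take W).getD c 0 = a.getD c 0 := by
  have hlt : c < (a.take W).length := by rw [List.length_take]; omega
  rw [List.getD_eq_getElem _ 0 hlt, List.getD_eq_getElem _ 0 hl]
  simp [List.getElem_take]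

-- the factorization: A's pair condition holds iff both axis conditions hold (rows of length ≥ W)
theorem aOk_factor (grid : List (List Int))
    (hrect : ∀ row ∈ grid, (grid.headD []).length ≤ row.length) (ph pw : Nat) :
    aOk grid grid.length (grid.headD []).length ph pw =
      (altV grid grid.length (grid.headD []).length ph && altHz grid (grid.headD []).length pw) := by
  set H := grid.length with hH
  set W := (grid.headD []).length with hW
  rw [Bool.eq_iff_iff, Bool.and_eq_true, aOk_iff, altV_iff, altHz_iff]
  constructor
  · intro hok
    have hrow : ∀ r < H, ∀ c < W, pvGet grid r c = pvGet grid (r % ph) c := by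
      intro r hr c hc
      have h1 := hok r hr c hc
      have h2 := hok (r % ph) (lt_of_le_of_lt (Nat.mod_le r ph) hr) c hc
      rw [Nat.mod_mod_of_dvd r (dvd_refl ph)] at h2
      rw [h1, h2]
    refine ⟨?_, ?_⟩
    · intro r hr
      have hmr : r % ph < H := lt_of_le_of_lt (Nat.mod_le r ph) hr
      have la := hrect _ (getD_mem hr)
      have lb := hrect _ (getD_mem hmr)
      apply List.ext_getElem
      · rw [List.length_take, List.length_take]; omega
      · intro c hc1 hc2
        rw [List.length_take] at hc1
        have hcW : c < W := lt_of_lt_of_le hc1 (Nat.min_le_left _ _)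
        have hl1 : c < (grid.getD r []).length := lt_of_lt_of_le hcW la
        have hl2 : c < (grid.getD (r % ph) []).length := lt_of_lt_of_le hcW lb
        have h := hrow r hr c hcW
        rw [pvGet, pvGet, List.getD_eq_getElem _ 0 hl1, List.getD_eq_getElem _ 0 hl2] at h
        simpa [List.getElem_take] using h
    · intro row hmem c hc
      obtain ⟨r, hr, hrq⟩ := List.mem_iff_getElem.mp hmem
      have hrow_eq : row = grid.getD r [] := by rw [List.getD_eq_getElem grid [] hr, hrq]
      have hmc : c % pw < W := lt_of_le_of_lt (Nat.mod_le c pw) hc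
      have h1 := hok r hr c hc
      have h2 := hok r hr (c % pw) hmc
      rw [Nat.mod_mod_of_dvd c (dvd_refl pw)] at h2
      rw [hrow_eq]
      calc (grid.getD r []).getD c 0 = pvGet grid r c := rfl
        _ = pvGet grid (r % ph) (c % pw) := h1
        _ = pvGet grid r (c % pw) := h2.symm
        _ = (grid.getD r []).getD (c % pw) 0 := rfl
  · rintro ⟨hV, hHz⟩ r hr c hc
    have hmr : r % ph < H := lt_of_le_of_lt (Nat.mod_le r ph) hr
    have la := hrect _ (getD_mem hr)
    have lb := hrect _ (getD_mem hmr)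
    have h1 : pvGet grid r c = pvGet grid (r % ph) c := by
      have htk := congrArg (fun l => List.getD l c 0) (hV r hr)
      simp only [] at htk
      rw [getD_take_eq _ _ _ hc (lt_of_lt_of_le hc la),
          getD_take_eq _ _ _ hc (lt_of_lt_of_le hc lb)] at htk
      exact htk
    have h2 := hHz (grid.getD (r % ph) []) (getD_mem hmr) c hc
    rw [h1]; exact h2

-- A's nested search equals the pair of independent find?s
theorem aSearch_eq (grid : List (List Int)) (H W : Nat) (P Q : Nat → Bool)
    (pws : List Nat) : ∀ (phs : List Nat),
    (∀ ph ∈ phs, ∀ pw ∈ pws, aOk grid H W ph pw = (P ph && Q pw)) →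
    aSearch grid H W pws phs =
      (match phs.find? P, pws.find? Q with
       | some ph, some pw => some (ph, pw)
       | _, _ => none) := by
  intro phs
  induction phs with
  | nil => intro _; rfl
  | cons ph t ih =>
    intro h
    have hcongr : pws.find? (fun pw => aOk grid H W ph pw) =
        pws.find? (fun pw => P ph && Q pw) :=
      pv_find?_congr (fun pw hpw => h ph List.mem_cons_self pw hpw)
    have hrest := ih (fun a ha pw hpw => h a (List.mem_cons_of_mem _ ha) pw hpw)
    simp only [aSearch, hcongr, List.find?]
    cases hP : P ph with
    | true =>
      simp only [Bool.true_and]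
      cases hQ : pws.find? Q with
      | some pw => simp
      | none => simp only [hQ, hrest]; cases t.find? P <;> rfl
    | false =>
      have : pws.find? (fun pw => false && Q pw) = none := by
        simp [List.find?_eq_none]
      simp only [Bool.false_and] at this ⊢
      rw [this, hrest]

-- ===== VERDICT (by name: the statement is the Claim_ definition above) =====
theorem detect_repeating_tiles_spec : Claim_equal_detect_repeating_tiles := by
  intro grid _ hpre
  obtain ⟨hne, hrect⟩ := hpre
  unfold Spec_detect_repeating_tiles detect_repeating_tiles detect_repeating_tiles_alt
  simp only []
  rw [aSearch_eq grid grid.length (grid.headD []).length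
      (altV grid grid.length (grid.headD []).length) (altHz grid (grid.headD []).length) _ _
      (fun ph _ pw _ => aOk_factor grid hrect ph pw)]
  cases ((List.range (max 2 (min 8 (min (grid.length / 2) ((grid.headD []).length / 2))))).map (· + 1)).find? (altV grid grid.length (grid.headD []).length) with
  | none => cases ((List.range (max 2 (min 8 (min (grid.length / 2) ((grid.headD []).length / 2))))).map (· + 1)).find? (altHz grid (grid.headD []).length) <;> rfl
  | some ph => cases ((List.range (max 2 (min 8 (min (grid.length / 2) ((grid.headD []).length / 2))))).map (· + 1)).find? (altHz grid (grid.headD []).length) <;> rfl
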